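-- pv_equiv track=rewrite | github.com/bssrdf/pyleet | MaximumNumberofPointswithCost.py | maxPoints2
-- ===== SOURCE A (Python) =====
-- from typing import List
-- from functools import lru_cache
--
-- def maxPoints2(points: List[List[int]]) -> int:
--     # top down DP got TLE
--     P = points
--     m, n = len(points), len(points[0])
--     @lru_cache(None)
--     def dfs(i, k):
--         if i >= m: return 0
--         res = P[i][k]
--         mx = 0
--         for j in range(n):
--             mx = max(mx, dfs(i+1, j) - abs(j-k))
--         return res + mx
--
--     return max(dfs(0, j) for j in range(n))
-- ===== SOURCE B (Python) =====
-- from typing import List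
--
-- def _sweep(g):
--     # out[k] = max over j <= k of g[j] - (k - j)
--     out = []
--     acc = None
--     for x in g:
--         acc = x if acc is None else max(acc - 1, x)
--         out.append(acc)
--     return out
--
-- def maxPoints2(points: List[List[int]]) -> int:
--     n = len(points[0])
--     g = [0] * n
--     for row in reversed(points):
--         left = _sweep(g)
--         right = _sweep(g[::-1])[::-1]
--         g = [row[k] + max(0, left[k], right[k]) for k in range(n)]
--     return max(g)
-- ===== Notes on version B (the rewrite author's own statement) =====
-- stated objective: faster
-- what changed: Replaced the memoized top-down recursion with an O(n) inner scan per cell by an iterative bottom-up row DP whose two directional running-max sweeps (left and right) eliminate the abs-distance inner loop, turning O(m*n^2) into O(m*n).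
import Mathlib
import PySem

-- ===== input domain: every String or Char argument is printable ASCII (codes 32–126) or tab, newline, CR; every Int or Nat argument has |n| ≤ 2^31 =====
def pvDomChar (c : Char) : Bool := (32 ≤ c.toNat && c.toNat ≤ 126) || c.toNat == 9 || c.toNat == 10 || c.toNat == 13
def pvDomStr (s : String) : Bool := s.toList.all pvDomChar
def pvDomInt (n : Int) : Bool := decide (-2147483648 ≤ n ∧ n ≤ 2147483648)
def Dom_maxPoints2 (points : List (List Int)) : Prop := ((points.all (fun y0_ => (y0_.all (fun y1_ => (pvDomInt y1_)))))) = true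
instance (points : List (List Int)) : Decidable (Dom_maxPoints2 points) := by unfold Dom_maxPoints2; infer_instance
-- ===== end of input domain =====

-- B replaces A's memoized top-down recursion (O(n) scan per cell) by a bottom-up row DP with two
-- directional running-max sweeps removing the abs-distance inner loop: O(m*n^2) → O(m*n).

-- ===== PORT A =====
-- dfs(i, k): recursion over the suffix of rows starting at row i (empty suffix ↔ i ≥ m).
def dfsA (n : Nat) : List (List Int) → Nat → Int
  | [], _ => 0
  | row :: rest, k =>
      PySem.List.pyGetD row (k : Int) 0 +
        (List.range n).foldl (fun mx j => max mx (dfsA n rest j - |(j : Int) - (k : Int)|)) 0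

def maxPoints2 (points : List (List Int)) : Int :=
  let n := (PySem.List.pyGetD points (0 : Int) []).length
  (PySem.List.max? ((List.range n).map (fun j => dfsA n points j)) (fun y => y)).getD 0

-- ===== PORT B =====
-- _sweep: out[k] = max over j ≤ k of g[j] - (k - j), by a running max.
def sweepAux (acc : Int) : List Int → List Int
  | [] => []
  | x :: xs => max (acc - 1) x :: sweepAux (max (acc - 1) x) xs

def sweepB : List Int → List Int
  | [] => []
  | x :: xs => x :: sweepAux x xs

def stepB (n : Nat) (g row : List Int) : List Int :=
  let left := sweepB g
  let right := (sweepB g.reverse).reverse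
  (List.range n).map (fun (k : Nat) =>
    PySem.List.pyGetD row (k : Int) 0 + max 0 (max (left.getD k 0) (right.getD k 0)))

def maxPoints2_alt (points : List (List Int)) : Int :=
  let n := (points.getD 0 []).length
  let g := points.reverse.foldl (fun g row => stepB n g row) (List.replicate n 0)
  (PySem.List.max? g (fun y => y)).getD 0

-- ===== PRECONDITION & SPEC =====
-- Pre_ excludes exactly the inputs where the Python A raises: empty grid (IndexError on points[0]),
-- empty first row (ValueError: max() of empty sequence), and a row shorter than the first (IndexError).
def Pre_maxPoints2 (points : List (List Int)) : Prop :=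
  points ≠ [] ∧ 0 < (points.headD []).length ∧
    ∀ row ∈ points, (points.headD []).length ≤ row.length
instance (points : List (List Int)) : Decidable (Pre_maxPoints2 points) := by
  unfold Pre_maxPoints2; infer_instance

def pvWitness_maxPoints2 : List (List Int) := [[1, 2, 3], [1, 5, 1], [3, 1, 1]]

def Spec_maxPoints2 (points : List (List Int)) (out : Int) : Prop := out = maxPoints2_alt points
instance (points : List (List Int)) (out : Int) : Decidable (Spec_maxPoints2 points out) := by
  unfold Spec_maxPoints2; infer_instance

-- ===== CLAIM (what is proved, stated in full; the proofs are below) =====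
def Claim_equal_maxPoints2 : Prop := ∀ (points : List (List Int)), Dom_maxPoints2 points → Pre_maxPoints2 points → Spec_maxPoints2 points (maxPoints2 points)

-- ===== LEMMAS AND PROOFS =====

-- Prefix running max, stated on indices: mpf g k = max_{j ≤ k} (g[j] - (k - j)).
def mpf (g : List Int) : Nat → Int
  | 0 => g.getD 0 0
  | k + 1 => max (mpf g k - 1) (g.getD (k + 1) 0)

theorem sweepAux_length (xs : List Int) (acc : Int) : (sweepAux acc xs).length = xs.length := by
  induction xs generalizing acc with
  | nil => rfl
  | cons x xs ih => simp [sweepAux, ih]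

theorem sweepB_length (g : List Int) : (sweepB g).length = g.length := by
  cases g with
  | nil => rfl
  | cons x xs => simp [sweepB, sweepAux_length]

theorem mpf_shift (acc y : Int) (ys : List Int) (k : Nat) :
    mpf (max (acc - 1) y :: ys) k = mpf (acc :: y :: ys) (k + 1) := by
  induction k with
  | zero => simp [mpf]
  | succ k ih => simp [mpf, ih]

theorem sweepAux_getD (xs : List Int) (acc : Int) (k : Nat) (hk : k < xs.length) :
    (sweepAux acc xs).getD k 0 = mpf (acc :: xs) (k + 1) := by
  induction xs generalizing acc k with
  | nil => simp at hk
  | cons y ys ih =>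
    cases k with
    | zero => simp [sweepAux, mpf]
    | succ k =>
      have hk' : k < ys.length := by simpa using hk
      simp only [sweepAux, List.getD_cons_succ]
      rw [ih _ _ hk', mpf_shift]

theorem sweepB_getD (g : List Int) (k : Nat) (hk : k < g.length) :
    (sweepB g).getD k 0 = mpf g k := by
  cases g with
  | nil => simp at hk
  | cons x xs =>
    cases k with
    | zero => simp [sweepB, mpf]
    | succ k =>
      have hk' : k < xs.length := by simpa using hk
      simp only [sweepB, List.getD_cons_succ]
      rw [sweepAux_getD _ _ _ hk']

theorem mpf_ge (g : List Int) (k j : Nat) (hj : j ≤ k) :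
    g.getD j 0 - ((k : Int) - (j : Int)) ≤ mpf g k := by
  induction k with
  | zero =>
    have hj0 : j = 0 := Nat.le_zero.mp hj
    subst hj0
    simp [mpf]
  | succ k ih =>
    rcases Nat.lt_or_ge j (k + 1) with h | h
    · have := ih (by omega)
      have hle : mpf g k - 1 ≤ mpf g (k + 1) := by simp [mpf]
      push_cast
      omega
    · have hj' : j = k + 1 := by omega
      subst hj'
      have : g.getD (k + 1) 0 ≤ mpf g (k + 1) := by simp [mpf]
      push_cast
      omega

theorem mpf_attained (g : List Int) (k : Nat) :
    ∃ j, j ≤ k ∧ mpf g k = g.getD j 0 - ((k : Int) - (j : Int)) := by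
  induction k with
  | zero => exact ⟨0, le_refl _, by simp [mpf]⟩
  | succ k ih =>
    obtain ⟨j, hj, hv⟩ := ih
    rcases le_or_gt (mpf g k - 1) (g.getD (k + 1) 0) with h | h
    · refine ⟨k + 1, le_refl _, ?_⟩
      simp only [mpf]
      push_cast
      omega
    · refine ⟨j, by omega, ?_⟩
      simp only [mpf]
      push_cast
      omega

-- the running max of h over range n, bounded above
theorem fold_max_le (n : Nat) (h : Nat → Int) (c : Int) (hc : 0 ≤ c)
    (hh : ∀ j, j < n → h j ≤ c) :
    (List.range n).foldl (fun a j => max a (h j)) 0 ≤ c := by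
  induction n with
  | zero => simpa using hc
  | succ n ih =>
    rw [List.range_succ, List.foldl_append]
    simp only [List.foldl_cons, List.foldl_nil]
    exact max_le (ih (fun j hj => hh j (by omega))) (hh n (by omega))

-- reversed indexing helper
theorem getD_reverse (g : List Int) (k : Nat) (hk : k < g.length) :
    g.reverse.getD k 0 = g.getD (g.length - 1 - k) 0 := by
  rw [List.getD_eq_getElem _ _ (by simpa using hk), List.getD_eq_getElem _ _ (by omega)]
  rw [List.getElem_reverse]

-- the inner loop of A equals B's max(0, left[k], right[k])
theorem inner_eq (n : Nat) (g : List Int) (f : Nat → Int) (k : Nat)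
    (hg : g.length = n) (hk : k < n) (hval : ∀ j, j < n → g.getD j 0 = f j) :
    (List.range n).foldl (fun mx j => max mx (f j - |(j : Int) - (k : Int)|)) 0
      = max 0 (max ((sweepB g).getD k 0) (((sweepB g.reverse).reverse).getD k 0)) := by
  have hkg : k < g.length := by omega
  have hrev : (sweepB g.reverse).length = n := by simp [sweepB_length, hg]
  have hR : ((sweepB g.reverse).reverse).getD k 0 = mpf g.reverse (n - 1 - k) := by
    rw [getD_reverse _ k (by rw [hrev]; omega), hrev]
    exact sweepB_getD _ _ (by simp [hg]; omega)
  have hL : (sweepB g).getD k 0 = mpf g k := sweepB_getD g k hkg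
  apply le_antisymm
  · apply fold_max_le _ _ _ (by positivity)
    intro j hj
    rcases le_or_gt j k with hjk | hjk
    · have h1 := mpf_ge g k j hjk
      have habs : |(j : Int) - (k : Int)| = (k : Int) - (j : Int) := by
        rw [abs_of_nonpos (by omega)]; ring
      rw [habs, ← hval j hj]
      refine le_trans ?_ (le_max_of_le_right (le_max_left _ _))
      rw [hL]; exact h1
    · have hj' : g.length - 1 - (g.length - 1 - j) = j := by omega
      have h1 := mpf_ge g.reverse (n - 1 - k) (g.length - 1 - j) (by omega)
      rw [getD_reverse g _ (by omega), hj'] at h1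
      have hcast : ((n - 1 - k : Nat) : Int) - ((g.length - 1 - j : Nat) : Int)
          = (j : Int) - (k : Int) := by push_cast [hg]; omega
      rw [hcast] at h1
      have habs : |(j : Int) - (k : Int)| = (j : Int) - (k : Int) :=
        abs_of_nonneg (by omega)
      rw [habs, ← hval j hj]
      refine le_trans ?_ (le_max_of_le_right (le_max_right _ _))
      rw [hR]; exact h1
  · have hfold := PySem.List.le_foldl_max_int (List.range n)
      (fun j => f j - |(j : Int) - (k : Int)|) 0
    apply max_le
    · exact hfold.1
    · apply max_le
      · obtain ⟨j, hjk, hv⟩ := mpf_attained g k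
        rw [hL, hv]
        have hj : j < n := by omega
        have habs : |(j : Int) - (k : Int)| = (k : Int) - (j : Int) := by
          rw [abs_of_nonpos (by omega)]; ring
        have h2 : f j - |(j : Int) - (k : Int)| ≤
            (List.range n).foldl (fun mx j => max mx (f j - |(j : Int) - (k : Int)|)) 0 := by
          simpa using hfold.2 j (List.mem_range.mpr hj)
        rw [habs] at h2
        rw [hval j hj]
        exact h2
      · obtain ⟨j', hj'k, hv⟩ := mpf_attained g.reverse (n - 1 - k)
        rw [hR, hv]
        have hj'lt : g.length - 1 - j' < g.length := by omega
        have hj : g.length - 1 - j' < n := by omega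
        rw [getD_reverse g j' (by omega)]
        have hcast : ((n - 1 - k : Nat) : Int) - ((j' : Nat) : Int)
            = ((g.length - 1 - j' : Nat) : Int) - (k : Int) := by push_cast [hg]; omega
        rw [hcast]
        have habs : |((g.length - 1 - j' : Nat) : Int) - (k : Int)|
            = ((g.length - 1 - j' : Nat) : Int) - (k : Int) :=
          abs_of_nonneg (by omega)
        have h2 : f (g.length - 1 - j') - |((g.length - 1 - j' : Nat) : Int) - (k : Int)| ≤
            (List.range n).foldl (fun mx j => max mx (f j - |(j : Int) - (k : Int)|)) 0 := by
          simpa using hfold.2 _ (List.mem_range.mpr hj)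
        rw [habs] at h2
        rw [hval _ hj]
        exact h2

-- B's fold over reversed rows, written as structural recursion matching dfsA
def GB (n : Nat) : List (List Int) → List Int
  | [] => List.replicate n 0
  | row :: rest => stepB n (GB n rest) row

theorem GB_eq_foldl (n : Nat) (rows : List (List Int)) :
    rows.reverse.foldl (fun g row => stepB n g row) (List.replicate n 0) = GB n rows := by
  rw [List.foldl_reverse]
  induction rows with
  | nil => rfl
  | cons r rs ih => simp [GB, ih]

theorem GB_length (n : Nat) (rows : List (List Int)) : (GB n rows).length = n := by
  cases rows with
  | nil => simp [GB]
  | cons r rs => simp [GB, stepB]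

theorem GB_getD (n : Nat) (rows : List (List Int)) (k : Nat) (hk : k < n) :
    (GB n rows).getD k 0 = dfsA n rows k := by
  induction rows generalizing k with
  | nil =>
    simp only [GB, dfsA, List.getD, List.getElem?_replicate]
    split <;> rfl
  | cons row rest ih =>
    have hmap : (GB n (row :: rest)).getD k 0
        = PySem.List.pyGetD row (k : Int) 0 +
            max 0 (max ((sweepB (GB n rest)).getD k 0)
              (((sweepB (GB n rest).reverse).reverse).getD k 0)) := by
      simp only [GB, stepB]
      rw [List.getD_eq_getElem _ _ (by simpa using hk)]
      simp
    rw [hmap]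
    simp only [dfsA]
    congr 1
    exact (inner_eq n (GB n rest) (fun j => dfsA n rest j) k (GB_length n rest) hk
      (fun j hj => ih j hj)).symm

-- ===== VERDICT (by name: the statement is the Claim_ definition above) =====
theorem maxPoints2_spec : Claim_equal_maxPoints2 := by
  intro points _ hpre
  obtain ⟨hne, hn, _⟩ := hpre
  unfold Spec_maxPoints2 maxPoints2 maxPoints2_alt
  obtain ⟨p, ps, rfl⟩ := List.exists_cons_of_ne_nil hne
  have hhead : PySem.List.pyGetD (p :: ps : List (List Int)) (0 : Int) ([] : List Int) = p := by
    simp [PySem.List.pyGetD_zero_cons]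
  have hhead2 : (p :: ps : List (List Int)).getD 0 [] = p := rfl
  simp only [hhead, hhead2]
  set n := p.length with hn'
  rw [GB_eq_foldl n (p :: ps)]
  have hlist : (List.range n).map (fun j => dfsA n (p :: ps) j) = GB n (p :: ps) := by
    apply List.ext_getElem
    · simp [GB_length]
    · intro i h1 h2
      have hi : i < n := by simpa using h1
      rw [List.getElem_map, List.getElem_range,
          ← List.getD_eq_getElem (GB n (p :: ps)) 0 h2, GB_getD n (p :: ps) i hi]
  rw [hlist]
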